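-- pv_equiv track=rewrite | github.com/hnasheralneam/aoc2024 | day2/part2.py | line_is_safe
-- ===== SOURCE A (Python) =====
-- def line_is_safe(arr):
--     dampened = False
--     increasing = arr[0] < arr[1]
--     for i in range(0, len(arr) - 1):
--         diff = abs(arr[i] - arr[i + 1])
--         if arr[i] > arr[i + 1] and increasing:
--             if dampened:
--                 return False
--             else:
--                 dampened = True
--         elif arr[i] < arr[i + 1] and not increasing:
--             if dampened:
--                 return False
--             else:
--                 dampened = True
--         elif arr[i] == arr[i + 1]:
--             if dampened:
--                 return False
--             else:
--                 dampened = True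
--         elif diff < 1 or diff > 3:
--             if dampened:
--                 return False
--             else:
--                 dampened = True
--     return True
-- ===== SOURCE B (Python) =====
-- def line_is_safe(arr):
--     increasing = arr[0] < arr[1]
--
--     def good(a, b):
--         return (a < b) == increasing and 1 <= abs(a - b) <= 3
--
--     n = len(arr) - 1
--     first = next((i for i in range(n) if not good(arr[i], arr[i + 1])), None)
--     if first is None:
--         return True
--     last = next((i for i in reversed(range(n)) if not good(arr[i], arr[i + 1])), None)
--     return first == last
-- ===== Notes on version B (the rewrite author's own statement) =====
-- stated objective: alternative
-- what changed: Replaces A's single stateful scan with a dampened flag by two staged directional searches: find the first violating pair index from the left and from the right (reversed range), returning safe iff no violation exists or the two indices coincide (i.e. at most one violating pair).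
import Mathlib
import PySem

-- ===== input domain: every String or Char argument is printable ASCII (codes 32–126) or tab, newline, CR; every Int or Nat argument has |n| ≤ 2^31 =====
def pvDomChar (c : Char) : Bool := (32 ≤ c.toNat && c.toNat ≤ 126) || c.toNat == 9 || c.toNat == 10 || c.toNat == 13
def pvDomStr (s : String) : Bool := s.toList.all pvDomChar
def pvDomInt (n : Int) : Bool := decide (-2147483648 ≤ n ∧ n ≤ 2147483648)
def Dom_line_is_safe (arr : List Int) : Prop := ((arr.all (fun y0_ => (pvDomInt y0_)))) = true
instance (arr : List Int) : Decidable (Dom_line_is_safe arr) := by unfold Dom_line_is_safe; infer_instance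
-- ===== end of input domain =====

-- B replaces A's stateful dampened-flag scan by two staged directional searches:
-- the first violating index from the left and from the right; safe iff none or they coincide.

-- ===== PORT A =====
-- loop over the index list range(0, len(arr)-1), carrying the dampened flag;
-- returning false early is the 'return False' branch, an exhausted list is 'return True'.
def lineIsSafeLoopA (arr : List Int) (increasing : Bool) : List Int → Bool → Bool
  | [], _ => true
  | i :: rest, dampened =>
    let a := PySem.List.pyGetD arr i 0
    let b := PySem.List.pyGetD arr (i + 1) 0
    let diff := |a - b|
    if a > b ∧ increasing = true then
      if dampened then false else lineIsSafeLoopA arr increasing rest true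
    else if a < b ∧ increasing = false then
      if dampened then false else lineIsSafeLoopA arr increasing rest true
    else if a = b then
      if dampened then false else lineIsSafeLoopA arr increasing rest true
    else if diff < 1 ∨ diff > 3 then
      if dampened then false else lineIsSafeLoopA arr increasing rest true
    else
      lineIsSafeLoopA arr increasing rest dampened

def line_is_safe (arr : List Int) : Bool :=
  let increasing := decide (PySem.List.pyGetD arr 0 0 < PySem.List.pyGetD arr 1 0)
  lineIsSafeLoopA arr increasing (PySem.List.pyRange 0 ((arr.length : Int) - 1) 1) false

-- ===== PORT B =====
-- good(a, b) of Source B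
def goodPair (increasing : Bool) (a b : Int) : Bool :=
  (decide (a < b) == increasing) && decide (1 ≤ |a - b| ∧ |a - b| ≤ 3)

-- next((i for i in range(n) if not good(arr[i], arr[i+1])), None)  →  List.find? over the range;
-- reversed(range(n)) → (pyRange 0 n 1).reverse
def line_is_safe_alt (arr : List Int) : Bool :=
  let increasing := decide (PySem.List.pyGetD arr 0 0 < PySem.List.pyGetD arr 1 0)
  let n : Int := (arr.length : Int) - 1
  let first := (PySem.List.pyRange 0 n 1).find?
    (fun i => !goodPair increasing (PySem.List.pyGetD arr i 0) (PySem.List.pyGetD arr (i + 1) 0))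
  match first with
  | none => true
  | some i =>
    let last := (PySem.List.pyRange 0 n 1).reverse.find?
      (fun i => !goodPair increasing (PySem.List.pyGetD arr i 0) (PySem.List.pyGetD arr (i + 1) 0))
    last == some i

-- ===== PRECONDITION & SPEC =====
-- Python A raises IndexError on lists of length < 2 (arr[0] / arr[1]); B raises there too.
def Pre_line_is_safe (arr : List Int) : Prop := 2 ≤ arr.length
instance (arr : List Int) : Decidable (Pre_line_is_safe arr) := by unfold Pre_line_is_safe; infer_instance
def pvWitness_line_is_safe : List Int := [1, 2, 4]

def Spec_line_is_safe (arr : List Int) (out : Bool) : Prop := out = line_is_safe_alt arr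
instance (arr : List Int) (out : Bool) : Decidable (Spec_line_is_safe arr out) := by unfold Spec_line_is_safe; infer_instance

-- ===== CLAIM (what is proved, stated in full; the proofs are below) =====
def Claim_equal_line_is_safe : Prop := ∀ (arr : List Int), Dom_line_is_safe arr → Pre_line_is_safe arr → Spec_line_is_safe arr (line_is_safe arr)

-- ===== LEMMAS AND PROOFS =====

-- A's four-way elif chain on one pair is the negation of B's good-pair predicate.
lemma branch_eq (inc : Bool) (a b : Int) (X Y : Bool) :
    (if a > b ∧ inc = true then X
     else if a < b ∧ inc = false then X
     else if a = b then X
     else if |a - b| < 1 ∨ |a - b| > 3 then X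
     else Y) = if (!goodPair inc a b) then X else Y := by
  simp only [goodPair]
  rcases inc <;> split_ifs <;> simp_all <;> omega

-- A's flag loop counts at most one bad index over the remaining range.
lemma loop_eq (arr : List Int) (inc : Bool) :
    ∀ (m k : Nat) (dampened : Bool), k + m + 1 = arr.length →
      lineIsSafeLoopA arr inc (PySem.List.pyRange (k : Int) ((arr.length : Int) - 1) 1) dampened
        = decide ((PySem.List.pyRange (k : Int) ((arr.length : Int) - 1) 1).countP
            (fun i => !goodPair inc (PySem.List.pyGetD arr i 0) (PySem.List.pyGetD arr (i + 1) 0))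
            + (if dampened then 1 else 0) ≤ 1)
  | 0, k, dampened, h => by
      rw [PySem.List.pyRange_one_eq_nil (by omega)]
      cases dampened <;> simp [lineIsSafeLoopA]
  | m + 1, k, dampened, h => by
      rw [PySem.List.pyRange_one_cons (by omega)]
      rw [List.countP_cons]
      show (if _ then _ else _) = _
      rw [branch_eq]
      have hcast : (k : Int) + 1 = ((k + 1 : Nat) : Int) := by push_cast; ring
      rw [hcast]
      by_cases hbad : (!goodPair inc (PySem.List.pyGetD arr (k : Int) 0)
          (PySem.List.pyGetD arr ((k + 1 : Nat) : Int) 0)) = true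
      · rw [if_pos hbad, if_pos hbad]
        cases dampened
        · rw [if_neg (by simp), loop_eq arr inc m (k + 1) true (by omega)]
          refine decide_eq_decide.mpr ?_
          norm_num
        · rw [if_pos rfl]
          symm
          rw [decide_eq_false_iff_not]
          simp
      · rw [if_neg hbad, if_neg hbad, loop_eq arr inc m (k + 1) dampened (by omega)]
        refine decide_eq_decide.mpr ?_
        cases dampened <;> norm_num

-- first-from-left equals first-from-right on a duplicate-free list iff at most one hit.
lemma find_first_last (P : Int → Bool) :
    ∀ (L : List Int), L.Nodup →
      (match L.find? P with
       | none => true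
       | some i => (L.reverse.find? P == some i)) = decide (L.countP P ≤ 1)
  | [], _ => by simp
  | x :: t, hnd => by
      have hx : x ∉ t := (List.nodup_cons.mp hnd).1
      have ht : t.Nodup := (List.nodup_cons.mp hnd).2
      by_cases hPx : P x = true
      · rw [List.find?_cons_of_pos hPx]
        rw [List.countP_cons, if_pos hPx]
        simp only [List.reverse_cons, List.find?_append]
        rcases hrev : t.reverse.find? P with _ | y
        · have hct : t.countP P = 0 := by
            rw [List.countP_eq_zero]
            intro a ha
            have := List.find?_eq_none.mp hrev a (List.mem_reverse.mpr ha)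
            simpa using this
          simp [hPx, hct]
        · have hy : P y = true := List.find?_some hrev
          have hmem : y ∈ t := List.mem_reverse.mp (List.mem_of_find?_eq_some hrev)
          have hne : y ≠ x := fun he => hx (he ▸ hmem)
          have hct : 0 < t.countP P := List.countP_pos_iff.mpr ⟨y, hmem, hy⟩
          have hd : decide (t.countP P + 1 ≤ 1) = false := by
            rw [decide_eq_false_iff_not]; omega
          rw [hd]
          simpa using hne
      · rw [List.find?_cons_of_neg hPx]
        rw [List.countP_cons, if_neg hPx]
        simp only [List.reverse_cons, List.find?_append]
        have hxnone : List.find? P [x] = none := by simp [hPx]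
        rcases hfind : t.find? P with _ | i
        · have hct : t.countP P = 0 := by
            rw [List.countP_eq_zero]
            intro a ha
            simpa using List.find?_eq_none.mp hfind a ha
          simp [hct]
        · have ih := find_first_last P t ht
          rw [hfind] at ih
          simpa [hxnone] using ih

-- ===== VERDICT (by name: the statement is the Claim_ definition above) =====
theorem line_is_safe_spec : Claim_equal_line_is_safe := by
  intro arr _ hpre
  unfold Spec_line_is_safe line_is_safe line_is_safe_alt Pre_line_is_safe at *
  have hA := loop_eq arr (decide (PySem.List.pyGetD arr 0 0 < PySem.List.pyGetD arr 1 0))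
    (arr.length - 1) 0 false (by omega)
  have hB := find_first_last
    (fun i => !goodPair (decide (PySem.List.pyGetD arr 0 0 < PySem.List.pyGetD arr 1 0))
      (PySem.List.pyGetD arr i 0) (PySem.List.pyGetD arr (i + 1) 0))
    (PySem.List.pyRange 0 ((arr.length : Int) - 1) 1)
    (PySem.List.nodup_pyRange_one 0 ((arr.length : Int) - 1))
  simp only [Nat.cast_zero] at hA
  rw [hA]
  exact hB.symm
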